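-- pv_equiv track=rewrite | github.com/DNKonanov/Genome-Complexity-Browser | gcb_server/app/gene_graph/source/old/GC_skew.py | skew_count
-- ===== SOURCE A (Python) =====
-- def skew_count(inseq):
--     Skew_counter = []
--     skew = 0
--     Skew_counter.append(skew)
--     for i in inseq:
--         if i == 'C' or i == 'c':
--             skew -= 1
--             Skew_counter.append(skew)
--         elif i == 'G' or i == 'g':
--             skew += 1
--             Skew_counter.append(skew)
--         else:
--             Skew_counter.append(skew)
--     return Skew_counter
-- ===== SOURCE B (Python) =====
-- def skew_count(inseq):
--     # Compute the final skew once with str.count, then build the list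
--     # back-to-front from the total by subtracting a running suffix sum.
--     total = inseq.count('G') + inseq.count('g') - inseq.count('C') - inseq.count('c')
--     out = [total]
--     suffix = 0
--     for ch in reversed(inseq):
--         if ch == 'G' or ch == 'g':
--             suffix += 1
--         elif ch == 'C' or ch == 'c':
--             suffix -= 1
--         out.append(total - suffix)
--     out.reverse()
--     return out
-- ===== Notes on version B (the rewrite author's own statement) =====
-- stated objective: alternative
-- what changed: Instead of A's forward running-skew loop, B computes the final total skew once with four str.count calls and then builds the list back-to-front: it walks the string in reverse maintaining a suffix delta sum, emits total minus suffix at each step, and reverses the result.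
import Mathlib
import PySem

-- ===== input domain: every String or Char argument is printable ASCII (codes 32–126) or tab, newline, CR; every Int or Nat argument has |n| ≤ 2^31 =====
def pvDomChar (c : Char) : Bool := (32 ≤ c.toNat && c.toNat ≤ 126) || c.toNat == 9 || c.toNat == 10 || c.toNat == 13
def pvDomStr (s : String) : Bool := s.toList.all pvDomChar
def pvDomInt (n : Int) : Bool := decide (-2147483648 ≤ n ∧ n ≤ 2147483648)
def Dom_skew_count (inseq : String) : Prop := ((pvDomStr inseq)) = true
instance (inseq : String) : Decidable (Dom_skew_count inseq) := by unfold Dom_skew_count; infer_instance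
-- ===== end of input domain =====

-- B computes the final skew once with str.count and builds the list back-to-front from the total by subtracting a running suffix sum; alternative decomposition, same cost.


-- ===== PORT A =====
-- literal transliteration: one forward loop carrying (skew, Skew_counter), appending after each branch
def skew_count (inseq : String) : List Int :=
  (inseq.toList.foldl
    (fun (st : Int × List Int) i =>
      if i = 'C' ∨ i = 'c' then (st.1 - 1, st.2 ++ [st.1 - 1])
      else if i = 'G' ∨ i = 'g' then (st.1 + 1, st.2 ++ [st.1 + 1])
      else (st.1, st.2 ++ [st.1]))
    (0, [0])).2

-- ===== PORT B =====
-- total = inseq.count('G') + inseq.count('g') - inseq.count('C') - inseq.count('c')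
-- then one loop over reversed(inseq) carrying (suffix, out), finally out.reverse()
def skew_count_alt (inseq : String) : List Int :=
  let total : Int := (PySem.Str.count inseq "G" : Int) + (PySem.Str.count inseq "g" : Int)
                     - (PySem.Str.count inseq "C" : Int) - (PySem.Str.count inseq "c" : Int)
  let st := inseq.toList.reverse.foldl
    (fun (st : Int × List Int) ch =>
      let suffix := if ch = 'G' ∨ ch = 'g' then st.1 + 1
                    else if ch = 'C' ∨ ch = 'c' then st.1 - 1
                    else st.1
      (suffix, st.2 ++ [total - suffix]))
    (0, [total])
  st.2.reverse

-- ===== PRECONDITION & SPEC =====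
def Spec_skew_count (inseq : String) (out : List Int) : Prop := out = skew_count_alt inseq
instance (inseq : String) (out : List Int) : Decidable (Spec_skew_count inseq out) := by unfold Spec_skew_count; infer_instance

-- ===== CLAIM (what is proved, stated in full; the proofs are below) =====
def Claim_equal_skew_count : Prop := ∀ (inseq : String), Dom_skew_count inseq → Spec_skew_count inseq (skew_count inseq)

-- ===== LEMMAS AND PROOFS =====
-- the per-character skew delta, and the prefix-sum scan both loops amount to
def pvDelta (c : Char) : Int := if c = 'G' ∨ c = 'g' then 1 else if c = 'C' ∨ c = 'c' then -1 else 0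

def pvScan (s : Int) : List Int → List Int
  | [] => [s]
  | d :: ds => s :: pvScan (s + d) ds

theorem pvScan_append_singleton (ds : List Int) : ∀ (s d : Int),
    pvScan s (ds ++ [d]) = pvScan s ds ++ [s + ds.sum + d] := by
  induction ds with
  | nil => intro s d; simp [pvScan]
  | cons e t ih => intro s d; simp [pvScan, ih, add_assoc]

theorem pvCountGo_single (c : Char) (l : List Char) : ∀ (fuel acc : Nat),
    l.length ≤ fuel → PySem.Chars.count.go [c] fuel l acc = acc + l.count c := by
  induction l with
  | nil => intro fuel acc _; cases fuel <;> simp [PySem.Chars.count.go]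
  | cons h t ih =>
    intro fuel acc hf
    cases fuel with
    | zero => simp at hf
    | succ f =>
      have ht : t.length ≤ f := by simpa using hf
      by_cases hc : c = h
      · subst hc
        simp only [PySem.Chars.count.go, List.isPrefixOf, beq_self_eq_true, Bool.true_and,
          if_true, List.length_singleton, List.drop_one, List.tail_cons]
        rw [ih f (acc + 1) ht]
        simp
        omega
      · have hb : (c == h) = false := beq_eq_false_iff_ne.mpr hc
        simp only [PySem.Chars.count.go, List.isPrefixOf, hb, Bool.false_and, Bool.false_eq_true,
          if_false]
        rw [ih f acc ht]
        simp [List.count_cons]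
        exact fun e => hc e.symm

theorem pvCount_single (c : Char) (l : List Char) : PySem.Chars.count l [c] = l.count c := by
  have := pvCountGo_single c l l.length 0 (le_refl _)
  simpa [PySem.Chars.count] using this

-- total skew = sum of the deltas
theorem pvTotal_eq_sum (l : List Char) :
    ((l.count 'G' : Int) + (l.count 'g' : Int) - (l.count 'C' : Int) - (l.count 'c' : Int))
      = (l.map pvDelta).sum := by
  induction l with
  | nil => simp
  | cons h t ih =>
    simp only [List.count_cons, List.map_cons, List.sum_cons]
    by_cases h1 : h = 'G'
    · subst h1
      have hd : pvDelta 'G' = 1 := by decide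
      rw [hd]; norm_num; linarith [ih]
    · by_cases h2 : h = 'g'
      · subst h2
        have hd : pvDelta 'g' = 1 := by decide
        rw [hd]
        have e1 : ('g' == 'G') = false := by decide
        simp only [e1, beq_self_eq_true, if_true]
        norm_num; linarith [ih]
      · by_cases h3 : h = 'C'
        · subst h3
          have hd : pvDelta 'C' = -1 := by decide
          rw [hd]
          have e1 : ('C' == 'G') = false := by decide
          have e2 : ('C' == 'g') = false := by decide
          simp only [e1, e2, beq_self_eq_true, if_true]
          norm_num; linarith [ih]
        · by_cases h4 : h = 'c'
          · subst h4
            have hd : pvDelta 'c' = -1 := by decide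
            rw [hd]
            have e1 : ('c' == 'G') = false := by decide
            have e2 : ('c' == 'g') = false := by decide
            have e3 : ('c' == 'C') = false := by decide
            simp only [e1, e2, e3, beq_self_eq_true, if_true]
            norm_num; linarith [ih]
          · have e1 : (h == 'G') = false := beq_eq_false_iff_ne.mpr h1
            have e2 : (h == 'g') = false := beq_eq_false_iff_ne.mpr h2
            have e3 : (h == 'C') = false := beq_eq_false_iff_ne.mpr h3
            have e4 : (h == 'c') = false := beq_eq_false_iff_ne.mpr h4
            have hd : pvDelta h = 0 := by simp [pvDelta, h1, h2, h3, h4]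
            simp [e1, e2, e3, e4, hd, ← ih]

-- A's loop is the forward scan
theorem pvA_loop (l : List Char) : ∀ (skew : Int) (acc : List Int),
    (l.foldl
      (fun (st : Int × List Int) i =>
        if i = 'C' ∨ i = 'c' then (st.1 - 1, st.2 ++ [st.1 - 1])
        else if i = 'G' ∨ i = 'g' then (st.1 + 1, st.2 ++ [st.1 + 1])
        else (st.1, st.2 ++ [st.1]))
      (skew, acc ++ [skew])).2 = acc ++ pvScan skew (l.map pvDelta) := by
  induction l with
  | nil => intro skew acc; simp [pvScan]
  | cons c t ih =>
    intro skew acc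
    by_cases hc : c = 'C' ∨ c = 'c'
    · have hg : ¬ (c = 'G' ∨ c = 'g') := by rcases hc with h | h <;> subst h <;> decide
      have hd : pvDelta c = -1 := by simp [pvDelta, hc, hg]
      simp only [List.foldl_cons, List.map_cons, if_pos hc, hd]
      rw [show acc ++ [skew] ++ [skew - 1] = (acc ++ [skew]) ++ [skew - 1] from rfl,
          ih (skew - 1) (acc ++ [skew])]
      simp [pvScan, sub_eq_add_neg]
    · by_cases hg : c = 'G' ∨ c = 'g'
      · have hd : pvDelta c = 1 := by simp [pvDelta, hg]
        simp only [List.foldl_cons, List.map_cons, if_neg hc, if_pos hg, hd]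
        rw [show acc ++ [skew] ++ [skew + 1] = (acc ++ [skew]) ++ [skew + 1] from rfl,
            ih (skew + 1) (acc ++ [skew])]
        simp [pvScan]
      · have hd : pvDelta c = 0 := by simp [pvDelta, hc, hg]
        simp only [List.foldl_cons, List.map_cons, if_neg hc, if_neg hg, hd]
        rw [show acc ++ [skew] ++ [skew] = (acc ++ [skew]) ++ [skew] from rfl,
            ih skew (acc ++ [skew])]
        simp [pvScan]

-- B's loop is a forward scan of negated deltas starting from total
theorem pvB_loop (total : Int) (m : List Char) : ∀ (s : Int) (o : List Int),
    (m.foldl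
      (fun (st : Int × List Int) ch =>
        let suffix := if ch = 'G' ∨ ch = 'g' then st.1 + 1
                      else if ch = 'C' ∨ ch = 'c' then st.1 - 1
                      else st.1
        (suffix, st.2 ++ [total - suffix]))
      (s, o ++ [total - s])).2
      = o ++ pvScan (total - s) (m.map (fun c => - pvDelta c)) := by
  induction m with
  | nil => intro s o; simp [pvScan]
  | cons c t ih =>
    intro s o
    by_cases hg : c = 'G' ∨ c = 'g'
    · have hd : pvDelta c = 1 := by simp [pvDelta, hg]
      simp only [List.foldl_cons, List.map_cons, if_pos hg, hd]
      rw [show o ++ [total - s] ++ [total - (s + 1)] = (o ++ [total - s]) ++ [total - (s + 1)] from rfl,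
          ih (s + 1) (o ++ [total - s])]
      have : total - (s + 1) = total - s + -1 := by ring
      simp [pvScan, this]
    · by_cases hc : c = 'C' ∨ c = 'c'
      · have hd : pvDelta c = -1 := by simp [pvDelta, hc, hg]
        simp only [List.foldl_cons, List.map_cons, if_neg hg, if_pos hc, hd]
        rw [show o ++ [total - s] ++ [total - (s - 1)] = (o ++ [total - s]) ++ [total - (s - 1)] from rfl,
            ih (s - 1) (o ++ [total - s])]
        have : total - (s - 1) = total - s + -(-1 : Int) := by ring
        simp [pvScan, this]
      · have hd : pvDelta c = 0 := by simp [pvDelta, hg, hc]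
        simp only [List.foldl_cons, List.map_cons, if_neg hg, if_neg hc, hd]
        rw [show o ++ [total - s] ++ [total - s] = (o ++ [total - s]) ++ [total - s] from rfl,
            ih s (o ++ [total - s])]
        simp [pvScan]

theorem pvSum_neg (t : List Char) :
    (List.map (fun c => -pvDelta c) t).sum = -(List.map pvDelta t).sum := by
  induction t with
  | nil => simp
  | cons x xs ihx => simp only [List.map_cons, List.sum_cons, ihx]; ring

-- reversing the backward scan gives the forward scan
theorem pvScan_reverse (l : List Char) : ∀ (T : Int),
    (pvScan T ((l.map (fun c => - pvDelta c)).reverse)).reverse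
      = pvScan (T - (l.map pvDelta).sum) (l.map pvDelta) := by
  induction l with
  | nil => intro T; simp [pvScan]
  | cons c t ih =>
    intro T
    simp only [List.map_cons, List.reverse_cons, List.sum_cons]
    rw [pvScan_append_singleton]
    simp only [List.reverse_append, List.reverse_cons, List.reverse_nil, List.nil_append,
      List.cons_append, List.sum_reverse]
    rw [ih, pvSum_neg]
    have h1 : T + -(t.map pvDelta).sum + -pvDelta c = T - (pvDelta c + (t.map pvDelta).sum) := by ring
    have h2 : T - (pvDelta c + (t.map pvDelta).sum) + pvDelta c = T - (t.map pvDelta).sum := by ring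
    rw [h1]
    simp [pvScan, h2]

-- ===== VERDICT (by name: the statement is the Claim_ definition above) =====
theorem skew_count_spec : Claim_equal_skew_count := by
  intro inseq _
  show skew_count inseq = skew_count_alt inseq
  unfold skew_count skew_count_alt
  have hG : PySem.Str.count inseq "G" = inseq.toList.count 'G' := by
    rw [PySem.Str.count_eq]; exact pvCount_single 'G' inseq.toList
  have hg : PySem.Str.count inseq "g" = inseq.toList.count 'g' := by
    rw [PySem.Str.count_eq]; exact pvCount_single 'g' inseq.toList
  have hC : PySem.Str.count inseq "C" = inseq.toList.count 'C' := by
    rw [PySem.Str.count_eq]; exact pvCount_single 'C' inseq.toList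
  have hc : PySem.Str.count inseq "c" = inseq.toList.count 'c' := by
    rw [PySem.Str.count_eq]; exact pvCount_single 'c' inseq.toList
  simp only [hG, hg, hC, hc]
  set l := inseq.toList with hl
  set T : Int := (l.count 'G' : Int) + (l.count 'g' : Int) - (l.count 'C' : Int) - (l.count 'c' : Int) with hT
  have hTsum : T = (l.map pvDelta).sum := pvTotal_eq_sum l
  have hA := pvA_loop l 0 []
  simp only [List.nil_append] at hA
  rw [hA]
  have hB := pvB_loop T l.reverse 0 []
  simp only [List.nil_append, sub_zero] at hB
  simp only [hB]
  rw [List.map_reverse, pvScan_reverse l T, ← hTsum]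
  simp
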